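-- pv_equiv track=rewrite | github.com/yaraabbadiiiii/app | connectivity/qr_provisionong.py | _split_pairs
-- ===== SOURCE A (Python) =====
-- from typing import Dict, Optional
--
-- def _unescape(s: str) -> str:
--     """Unescape \;  \:  \\ sequences."""
--     out: list[str] = []
--     it = iter(range(len(s)))
--     i = 0
--     while i < len(s):
--         ch = s[i]
--         if ch == "\\" and i + 1 < len(s):
--             nxt = s[i + 1]
--             if nxt in (";", ":", "\\"):
--                 out.append(nxt)
--                 i += 2
--                 continue
--         out.append(ch)
--         i += 1
--     return "".join(out)
--
-- def _split_pairs(body: str) -> Dict[str, str]: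
--     """
--     Split WIFI body (after 'WIFI:') into key:value pairs handling escapes.
--     Pairs are separated by unescaped ';' and key/value by unescaped ':'.
--     """
--     pairs: Dict[str, str] = {}
--
--     token = []
--     i = 0
--     n = len(body)
--
--     def flush(tok: str) -> None:
--         if not tok:
--             return
--         # split on first unescaped ':'
--         k = []
--         v = []
--         j = 0
--         while j < len(tok):
--             ch = tok[j]
--             if ch == "\\" and j + 1 < len(tok):
--                 # keep escape for now; _unescape() later
--                 if v:
--                     v.append(ch)
--                 else:
--                     k.append(ch)
--                 j += 1
--                 # append next literal
--                 if v:
--                     v.append(tok[j])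
--                 else:
--                     k.append(tok[j])
--                 j += 1
--                 continue
--             if ch == ":":
--                 # first unescaped ':' splits key/value
--                 v.extend(tok[j + 1 :])
--                 break
--             k.append(ch)
--             j += 1
--         key = "".join(k).strip().upper()
--         val = _unescape("".join(v)).strip()
--         if key:
--             pairs[key] = val
--
--     while i < n:
--         ch = body[i]
--         if ch == "\\" and i + 1 < n:
--             token.append(ch)
--             token.append(body[i + 1])
--             i += 2
--             continue
--         if ch == ";":
--             flush("".join(token))
--             token = []
--             i += 1
--             continue
--         token.append(ch)
--         i += 1
--
--     # trailing token (before optional final ';')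
--     flush("".join(token))
--     return pairs
-- ===== SOURCE B (Python) =====
-- from typing import Dict
--
-- def _split_pairs(body: str) -> Dict[str, str]:
--     """Single linear pass: two buffers (key, value) plus an in_value flag."""
--     pairs: Dict[str, str] = {}
--     key_buf: list = []
--     val_buf: list = []
--     in_value = False
--
--     def finish() -> None:
--         key = "".join(key_buf).strip().upper()
--         if key:
--             pairs[key] = "".join(val_buf).strip()
--
--     i = 0
--     n = len(body)
--     while i < n:
--         ch = body[i]
--         if ch == "\\" and i + 1 < n:
--             nxt = body[i + 1]
--             if in_value:
--                 if nxt in (";", ":", "\\"):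
--                     val_buf.append(nxt)
--                 else:
--                     val_buf.append(ch)
--                     val_buf.append(nxt)
--             else:
--                 key_buf.append(ch)
--                 key_buf.append(nxt)
--             i += 2
--         elif ch == ";":
--             finish()
--             key_buf = []
--             val_buf = []
--             in_value = False
--             i += 1
--         elif ch == ":" and not in_value:
--             in_value = True
--             i += 1
--         else:
--             (val_buf if in_value else key_buf).append(ch)
--             i += 1
--     finish()
--     return pairs
-- ===== Notes on version B (the rewrite author's own statement) =====
-- stated objective: simpler
-- what changed: A accumulates each separator-delimited token into a buffer and then re-parses it twice (a key/value split scan plus a separate _unescape pass over the value); B is one linear pass over the body that maintains key and value buffers and an in_value flag, unescaping value characters on the fly, so the token re-parsing disappears.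
import Mathlib
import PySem

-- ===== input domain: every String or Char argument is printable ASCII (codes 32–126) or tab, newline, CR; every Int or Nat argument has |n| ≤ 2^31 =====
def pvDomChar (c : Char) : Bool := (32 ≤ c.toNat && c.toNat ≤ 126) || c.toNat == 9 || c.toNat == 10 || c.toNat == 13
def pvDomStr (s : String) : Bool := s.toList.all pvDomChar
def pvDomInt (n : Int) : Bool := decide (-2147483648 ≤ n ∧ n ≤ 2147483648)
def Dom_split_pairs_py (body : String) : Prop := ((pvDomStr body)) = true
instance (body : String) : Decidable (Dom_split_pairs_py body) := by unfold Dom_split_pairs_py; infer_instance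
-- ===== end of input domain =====

-- B replaces A's build-token-then-reparse structure by one linear pass with key/value buffers; objective: simpler.

-- ===== PORT A =====
-- _unescape: while-loop over s; "\;" "\:" "\\" collapse to the escaped char
def unescA : List Char → List Char
  | [] => []
  | c :: rest =>
    if c = '\\' then
      match rest with
      | nxt :: rest' =>
        if nxt = ';' ∨ nxt = ':' ∨ nxt = '\\' then nxt :: unescA rest'
        else c :: unescA (nxt :: rest')
      | [] => [c]
    else c :: unescA rest
termination_by l => l.length
decreasing_by all_goals (simp only [List.length_cons]; omega)

-- flush's inner while-loop over tok: accumulators k and v (v is only written at the ':' break, as in A)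
def floopA : List Char → List Char → List Char → List Char × List Char
  | [], k, v => (k, v)
  | c :: rest, k, v =>
    if c = '\\' then
      match rest with
      | nxt :: rest' =>
        if v ≠ [] then floopA rest' k (v ++ [c, nxt])
        else floopA rest' (k ++ [c, nxt]) v
      | [] => (k ++ [c], v)          -- escape guard fails (j+1 = len); ch ≠ ':', so k.append(ch)
    else if c = ':' then (k, v ++ rest)   -- v.extend(tok[j+1:]); break
    else floopA rest (k ++ [c]) v
termination_by l _ _ => l.length
decreasing_by all_goals (simp only [List.length_cons]; omega)

def flushA (tok : List Char) (pairs : PySem.Dict String String) : PySem.Dict String String :=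
  if tok = [] then pairs
  else
    let kv := floopA tok [] []
    let key := PySem.Chars.upper (PySem.Chars.strip kv.1)
    let val := PySem.Chars.strip (unescA kv.2)
    if key ≠ [] then pairs.insert (String.ofList key) (String.ofList val) else pairs

-- the main while-loop over body, building token
def mainA : List Char → List Char → PySem.Dict String String → PySem.Dict String String
  | [], tok, d => flushA tok d
  | c :: rest, tok, d =>
    if c = '\\' then
      match rest with
      | nxt :: rest' => mainA rest' (tok ++ [c, nxt]) d
      | [] => mainA [] (tok ++ [c]) d    -- token.append(ch); i += 1; loop ends
    else if c = ';' then mainA rest [] (flushA tok d)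
    else mainA rest (tok ++ [c]) d
termination_by l _ _ => l.length
decreasing_by all_goals (simp only [List.length_cons]; omega)

def split_pairs_py (body : String) : List (String × String) :=
  (mainA body.toList [] PySem.Dict.empty).items

-- ===== PORT B =====
def finB (k v : List Char) (d : PySem.Dict String String) : PySem.Dict String String :=
  let key := PySem.Chars.upper (PySem.Chars.strip k)
  if key ≠ [] then d.insert (String.ofList key) (String.ofList (PySem.Chars.strip v)) else d

-- one linear pass: key buffer, value buffer, in_value flag
def loopB : List Char → List Char → List Char → Bool → PySem.Dict String String → PySem.Dict String String
  | [], k, v, _, d => finB k v d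
  | c :: rest, k, v, inv, d =>
    if c = '\\' then
      match rest with
      | nxt :: rest' =>
        if inv then
          if nxt = ';' ∨ nxt = ':' ∨ nxt = '\\' then loopB rest' k (v ++ [nxt]) inv d
          else loopB rest' k (v ++ [c, nxt]) inv d
        else loopB rest' (k ++ [c, nxt]) v inv d
      | [] =>   -- no next char: the final else appends to the active buffer
        if inv then loopB [] k (v ++ [c]) inv d else loopB [] (k ++ [c]) v inv d
    else if c = ';' then loopB rest [] [] false (finB k v d)
    else if c = ':' ∧ inv = false then loopB rest k v true d
    else if inv then loopB rest k (v ++ [c]) inv d else loopB rest (k ++ [c]) v inv d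
termination_by l _ _ _ _ => l.length
decreasing_by all_goals (simp only [List.length_cons]; omega)

def split_pairs_py_alt (body : String) : List (String × String) :=
  (loopB body.toList [] [] false PySem.Dict.empty).items

-- ===== PRECONDITION & SPEC =====
def Spec_split_pairs_py (body : String) (out : List (String × String)) : Prop := out = split_pairs_py_alt body
instance (body : String) (out : List (String × String)) : Decidable (Spec_split_pairs_py body out) := by unfold Spec_split_pairs_py; infer_instance

-- ===== CLAIM (what is proved, stated in full; the proofs are below) =====
def Claim_equal_split_pairs_py : Prop := ∀ (body : String), Dom_split_pairs_py body → Spec_split_pairs_py body (split_pairs_py body)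

-- ===== LEMMAS AND PROOFS =====

-- small-step equations for the ports (their if/match bodies need eq_def to unfold)
theorem unescA_nil : unescA [] = [] := by rw [unescA.eq_def]
theorem unescA_esc (nxt : Char) (l : List Char) (hn : nxt = ';' ∨ nxt = ':' ∨ nxt = '\\') :
    unescA ('\\' :: nxt :: l) = nxt :: unescA l := by rw [unescA.eq_def]; simp [hn]
theorem unescA_noesc (nxt : Char) (l : List Char) (hn : ¬ (nxt = ';' ∨ nxt = ':' ∨ nxt = '\\')) :
    unescA ('\\' :: nxt :: l) = '\\' :: unescA (nxt :: l) := by rw [unescA.eq_def]; simp [hn]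
theorem unescA_bs : unescA ['\\'] = ['\\'] := by rw [unescA.eq_def]; rfl
theorem unescA_cons (c : Char) (l : List Char) (hb : c ≠ '\\') :
    unescA (c :: l) = c :: unescA l := by rw [unescA.eq_def]; simp [hb]

theorem floopA_pair (nxt : Char) (l k : List Char) :
    floopA ('\\' :: nxt :: l) k [] = floopA l (k ++ ['\\', nxt]) [] := by
  rw [floopA.eq_def]; simp
theorem floopA_bs (k v : List Char) : floopA ['\\'] k v = (k ++ ['\\'], v) := by
  rw [floopA.eq_def]; simp
theorem floopA_colon (l k v : List Char) : floopA (':' :: l) k v = (k, v ++ l) := by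
  rw [floopA.eq_def]; simp
theorem floopA_cons (c : Char) (l k v : List Char) (hb : c ≠ '\\') (hc : c ≠ ':') :
    floopA (c :: l) k v = floopA l (k ++ [c]) v := by rw [floopA.eq_def]; simp [hb, hc]

theorem mainA_nil (tok : List Char) (d : PySem.Dict String String) :
    mainA [] tok d = flushA tok d := by rw [mainA.eq_def]

theorem loopB_nil (k v : List Char) (inv : Bool) (d : PySem.Dict String String) :
    loopB [] k v inv d = finB k v d := by rw [loopB.eq_def]
theorem loopB_pair_true_spec (nxt : Char) (l k v : List Char) (d : PySem.Dict String String)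
    (hn : nxt = ';' ∨ nxt = ':' ∨ nxt = '\\') :
    loopB ('\\' :: nxt :: l) k v true d = loopB l k (v ++ [nxt]) true d := by
  rw [loopB.eq_def]; simp [hn]
theorem loopB_pair_true_nospec (nxt : Char) (l k v : List Char) (d : PySem.Dict String String)
    (hn : ¬ (nxt = ';' ∨ nxt = ':' ∨ nxt = '\\')) :
    loopB ('\\' :: nxt :: l) k v true d = loopB l k (v ++ ['\\', nxt]) true d := by
  rw [loopB.eq_def]; simp [hn]
theorem loopB_pair_false (nxt : Char) (l k v : List Char) (d : PySem.Dict String String) :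
    loopB ('\\' :: nxt :: l) k v false d = loopB l (k ++ ['\\', nxt]) v false d := by
  rw [loopB.eq_def]; simp
theorem loopB_bs_true (k v : List Char) (d : PySem.Dict String String) :
    loopB ['\\'] k v true d = finB k (v ++ ['\\']) d := by
  rw [loopB.eq_def]; simp [loopB_nil]
theorem loopB_bs_false (k v : List Char) (d : PySem.Dict String String) :
    loopB ['\\'] k v false d = finB (k ++ ['\\']) v d := by
  rw [loopB.eq_def]; simp [loopB_nil]
theorem loopB_semi (l k v : List Char) (inv : Bool) (d : PySem.Dict String String) :
    loopB (';' :: l) k v inv d = loopB l [] [] false (finB k v d) := by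
  rw [loopB.eq_def]; simp
theorem loopB_colon_false (l k v : List Char) (d : PySem.Dict String String) :
    loopB (':' :: l) k v false d = loopB l k v true d := by
  rw [loopB.eq_def]; simp
theorem loopB_cons_true (c : Char) (l k v : List Char) (d : PySem.Dict String String)
    (hb : c ≠ '\\') (hs : c ≠ ';') :
    loopB (c :: l) k v true d = loopB l k (v ++ [c]) true d := by
  rw [loopB.eq_def]; simp [hb, hs]
theorem loopB_cons_false (c : Char) (l k v : List Char) (d : PySem.Dict String String)
    (hb : c ≠ '\\') (hs : c ≠ ';') (hc : c ≠ ':') :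
    loopB (c :: l) k v false d = loopB l (k ++ [c]) v false d := by
  rw [loopB.eq_def]; simp [hb, hs, hc]

-- scan3 tok = (key chars, colon found?, raw chars after the first unescaped ':') — flush's split, proof-side form
def scan3 : List Char → List Char × Bool × List Char
  | [] => ([], false, [])
  | c :: rest =>
    if c = '\\' then
      match rest with
      | nxt :: rest' => (c :: nxt :: (scan3 rest').1, (scan3 rest').2.1, (scan3 rest').2.2)
      | [] => ([c], false, [])
    else if c = ':' then ([], true, rest)
    else (c :: (scan3 rest).1, (scan3 rest).2.1, (scan3 rest).2.2)
termination_by l => l.length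
decreasing_by all_goals (simp only [List.length_cons]; omega)

theorem scan3_nil : scan3 [] = ([], false, []) := by rw [scan3.eq_def]
theorem scan3_pair (nxt : Char) (l : List Char) :
    scan3 ('\\' :: nxt :: l) = ('\\' :: nxt :: (scan3 l).1, (scan3 l).2.1, (scan3 l).2.2) := by
  rw [scan3.eq_def]; simp
theorem scan3_bs : scan3 ['\\'] = (['\\'], false, []) := by rw [scan3.eq_def]; rfl
theorem scan3_colon (l : List Char) : scan3 (':' :: l) = ([], true, l) := by
  rw [scan3.eq_def]; simp
theorem scan3_cons (c : Char) (l : List Char) (hb : c ≠ '\\') (hc : c ≠ ':') :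
    scan3 (c :: l) = (c :: (scan3 l).1, (scan3 l).2.1, (scan3 l).2.2) := by
  rw [scan3.eq_def]; simp [hb, hc]

-- well-formed token: a concatenation of escape pairs ['\\', c] and non-backslash singles (what mainA builds mid-loop)
def wfTok : List Char → Bool
  | [] => true
  | c :: rest =>
    if c = '\\' then
      match rest with
      | _ :: rest' => wfTok rest'
      | [] => false
    else wfTok rest
termination_by l => l.length
decreasing_by all_goals (simp only [List.length_cons]; omega)

theorem wfTok_nil : wfTok [] = true := by rw [wfTok.eq_def]
theorem wfTok_pair (nxt : Char) (l : List Char) : wfTok ('\\' :: nxt :: l) = wfTok l := by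
  rw [wfTok.eq_def]; simp
theorem wfTok_bs : wfTok ['\\'] = false := by rw [wfTok.eq_def]; rfl
theorem wfTok_cons (c : Char) (l : List Char) (hb : c ≠ '\\') : wfTok (c :: l) = wfTok l := by
  rw [wfTok.eq_def]; simp [hb]

theorem wfTok_append_pair (t : List Char) (c : Char) (h : wfTok t = true) :
    wfTok (t ++ ['\\', c]) = true := by
  fun_induction wfTok t with
  | case1 => rw [List.nil_append, wfTok_pair, wfTok_nil]
  | case2 nxt rest' ih =>
      simp only [List.cons_append, wfTok_pair]; exact ih h
  | case3 => simp at h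
  | case4 c' rest hb ih =>
      simp only [List.cons_append, wfTok_cons _ _ hb]; exact ih h

theorem wfTok_append_single (t : List Char) (c : Char) (hc : c ≠ '\\') (h : wfTok t = true) :
    wfTok (t ++ [c]) = true := by
  fun_induction wfTok t with
  | case1 => rw [List.nil_append, wfTok_cons c [] hc, wfTok_nil]
  | case2 nxt rest' ih =>
      simp only [List.cons_append, wfTok_pair]; exact ih h
  | case3 => simp at h
  | case4 c' rest hb ih =>
      simp only [List.cons_append, wfTok_cons _ _ hb]; exact ih h

theorem scan3_tail_wf (t : List Char) (h : wfTok t = true) :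
    wfTok (scan3 t).2.2 = true := by
  fun_induction scan3 t with
  | case1 => simpa [scan3_nil] using wfTok_nil
  | case2 nxt rest' ih => rw [wfTok_pair] at h; simpa using ih h
  | case3 => rw [wfTok_bs] at h; simp at h
  | case4 rest => rw [wfTok_cons ':' rest (by decide)] at h; simpa using h
  | case5 c' rest hb hc ih => rw [wfTok_cons c' rest hb] at h; simpa using ih h

theorem scan3_tail_of_not_found (t : List Char) (h : (scan3 t).2.1 = false) :
    (scan3 t).2.2 = [] := by
  fun_induction scan3 t with
  | case1 => rfl
  | case2 nxt rest' ih => exact ih (by simpa using h)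
  | case3 => rfl
  | case4 rest => simp at h
  | case5 c' rest hb hc ih => exact ih (by simpa using h)

theorem scan3_append_pair (t : List Char) (c : Char) (h : wfTok t = true) :
    scan3 (t ++ ['\\', c]) =
      if (scan3 t).2.1 then ((scan3 t).1, true, (scan3 t).2.2 ++ ['\\', c])
      else ((scan3 t).1 ++ ['\\', c], false, []) := by
  fun_induction scan3 t with
  | case1 => simp [scan3_pair, scan3_nil]
  | case2 nxt rest' ih =>
      rw [wfTok_pair] at h
      simp only [List.cons_append, scan3_pair, ih h]
      by_cases hf : (scan3 rest').2.1 <;> simp [hf]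
  | case3 => rw [wfTok_bs] at h; simp at h
  | case4 rest => simp [scan3_colon]
  | case5 c' rest hb hc ih =>
      rw [wfTok_cons c' rest hb] at h
      simp only [List.cons_append, scan3_cons _ _ hb hc, ih h]
      by_cases hf : (scan3 rest).2.1 <;> simp [hf]

theorem scan3_append_single (t : List Char) (c : Char) (hc : c ≠ '\\') (h : wfTok t = true) :
    scan3 (t ++ [c]) =
      if (scan3 t).2.1 then ((scan3 t).1, true, (scan3 t).2.2 ++ [c])
      else if c = ':' then ((scan3 t).1, true, [])
      else ((scan3 t).1 ++ [c], false, []) := by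
  fun_induction scan3 t with
  | case1 =>
      by_cases h2 : c = ':'
      · subst h2; simp [scan3_colon]
      · simp [scan3_cons c [] hc h2, scan3_nil, h2]
  | case2 nxt rest' ih =>
      rw [wfTok_pair] at h
      simp only [List.cons_append, scan3_pair, ih h]
      by_cases hf : (scan3 rest').2.1 <;> by_cases h2 : c = ':' <;> simp [hf, h2]
  | case3 => rw [wfTok_bs] at h; simp at h
  | case4 rest => simp [scan3_colon]
  | case5 c' rest hb hc' ih =>
      rw [wfTok_cons c' rest hb] at h
      simp only [List.cons_append, scan3_cons _ _ hb hc', ih h]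
      by_cases hf : (scan3 rest).2.1 <;> by_cases h2 : c = ':' <;> simp [hf, h2]

theorem scan3_append_bs (t : List Char) (h : wfTok t = true) :
    scan3 (t ++ ['\\']) =
      if (scan3 t).2.1 then ((scan3 t).1, true, (scan3 t).2.2 ++ ['\\'])
      else ((scan3 t).1 ++ ['\\'], false, []) := by
  fun_induction scan3 t with
  | case1 => simp [scan3_bs]
  | case2 nxt rest' ih =>
      rw [wfTok_pair] at h
      simp only [List.cons_append, scan3_pair, ih h]
      by_cases hf : (scan3 rest').2.1 <;> simp [hf]
  | case3 => rw [wfTok_bs] at h; simp at h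
  | case4 rest => simp [scan3_colon]
  | case5 c' rest hb hc ih =>
      rw [wfTok_cons c' rest hb] at h
      simp only [List.cons_append, scan3_cons _ _ hb hc, ih h]
      by_cases hf : (scan3 rest).2.1 <;> simp [hf]

theorem unescA_append_pair (r : List Char) (c : Char) (h : wfTok r = true) :
    unescA (r ++ ['\\', c]) =
      unescA r ++ (if c = ';' ∨ c = ':' ∨ c = '\\' then [c] else ['\\', c]) := by
  fun_induction wfTok r with
  | case1 =>
      by_cases hs : c = ';' ∨ c = ':' ∨ c = '\\'
      · simp [unescA_esc c [] hs, unescA_nil, hs]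
      · have hcb : c ≠ '\\' := fun hh => hs (Or.inr (Or.inr hh))
        simp [unescA_noesc c [] hs, unescA_cons c [] hcb, unescA_nil, hs]
  | case2 nxt rest' ih =>
      by_cases hn : nxt = ';' ∨ nxt = ':' ∨ nxt = '\\'
      · simp only [List.cons_append, unescA_esc nxt _ hn, ih h]
      · have hnb : nxt ≠ '\\' := fun hh => hn (Or.inr (Or.inr hh))
        simp only [List.cons_append, unescA_noesc nxt _ hn, unescA_cons nxt _ hnb, ih h]
  | case3 => simp at h
  | case4 c' rest hb ih =>
      simp only [List.cons_append, unescA_cons c' _ hb, ih h]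

theorem unescA_append_single (r : List Char) (c : Char) (h : wfTok r = true) :
    unescA (r ++ [c]) = unescA r ++ [c] := by
  fun_induction wfTok r with
  | case1 =>
      by_cases hb : c = '\\'
      · subst hb; simp [unescA_bs, unescA_nil]
      · simp [unescA_cons c [] hb, unescA_nil]
  | case2 nxt rest' ih =>
      by_cases hn : nxt = ';' ∨ nxt = ':' ∨ nxt = '\\'
      · simp only [List.cons_append, unescA_esc nxt _ hn, ih h]
      · have hnb : nxt ≠ '\\' := fun hh => hn (Or.inr (Or.inr hh))
        simp only [List.cons_append, unescA_noesc nxt _ hn, unescA_cons nxt _ hnb, ih h]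
  | case3 => simp at h
  | case4 c' rest hb ih =>
      simp only [List.cons_append, unescA_cons c' _ hb, ih h]

theorem floopA_eq_scan3 (tok : List Char) :
    ∀ k, floopA tok k [] = (k ++ (scan3 tok).1, (scan3 tok).2.2) := by
  fun_induction scan3 tok with
  | case1 => intro k; rw [floopA.eq_def]; simp
  | case2 nxt rest' ih =>
      intro k
      rw [floopA_pair]
      simpa [List.append_assoc] using ih (k ++ ['\\', nxt])
  | case3 => intro k; rw [floopA_bs]
  | case4 rest => intro k; rw [floopA_colon]; simp
  | case5 c' rest hb hc ih =>
      intro k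
      rw [floopA_cons c' rest k [] hb hc]
      simpa [List.append_assoc] using ih (k ++ [c'])

theorem flushA_eq_finB (tok : List Char) (d : PySem.Dict String String) :
    flushA tok d = finB (scan3 tok).1 (unescA (scan3 tok).2.2) d := by
  cases tok with
  | nil =>
      rw [scan3_nil]
      have hk : PySem.Chars.upper (PySem.Chars.strip ([] : List Char)) = [] := by decide
      rw [unescA_nil]
      simp [flushA, finB, hk]
  | cons c rest =>
      simp only [flushA, if_neg (List.cons_ne_nil c rest), floopA_eq_scan3 (c :: rest) [],
        List.nil_append, finB]

-- the loop invariant: A's token state corresponds to B's (key buffer, value buffer, in_value) state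
theorem main_inv (rest tok : List Char) (d : PySem.Dict String String) :
    wfTok tok = true →
      mainA rest tok d = loopB rest (scan3 tok).1 (unescA (scan3 tok).2.2) (scan3 tok).2.1 d := by
  fun_induction mainA rest tok d with
  | case1 tok d =>
      intro _
      rw [loopB_nil]
      exact flushA_eq_finB tok d
  | case2 tok d nxt rest' ih =>
      intro h
      rw [ih (wfTok_append_pair tok nxt h), scan3_append_pair tok nxt h]
      by_cases hf : (scan3 tok).2.1
      · simp only [hf, ite_true]
        rw [unescA_append_pair _ nxt (scan3_tail_wf tok h)]
        by_cases hn : nxt = ';' ∨ nxt = ':' ∨ nxt = '\\'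
        · rw [loopB_pair_true_spec nxt rest' _ _ d hn]; simp [hn]
        · rw [loopB_pair_true_nospec nxt rest' _ _ d hn]; simp [hn]
      · have ht := scan3_tail_of_not_found tok (by simpa using hf)
        simp only [hf, Bool.false_eq_true, ite_false, ht, unescA_nil, loopB_pair_false]
  | case3 tok d ih =>
      intro h
      rw [mainA_nil, flushA_eq_finB, scan3_append_bs tok h]
      by_cases hf : (scan3 tok).2.1
      · simp only [hf, ite_true]
        rw [unescA_append_single _ '\\' (scan3_tail_wf tok h), loopB_bs_true]
      · have ht := scan3_tail_of_not_found tok (by simpa using hf)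
        simp only [hf, Bool.false_eq_true, ite_false, ht, unescA_nil, loopB_bs_false]
  | case4 rest tok d hbs ih =>
      intro h
      rw [ih wfTok_nil, loopB_semi, flushA_eq_finB tok d]
      simp [scan3_nil, unescA_nil]
  | case5 c rest tok d hb hs ih =>
      intro h
      rw [ih (wfTok_append_single tok c hb h), scan3_append_single tok c hb h]
      by_cases hf : (scan3 tok).2.1
      · simp only [hf, ite_true]
        rw [unescA_append_single _ c (scan3_tail_wf tok h), loopB_cons_true c rest _ _ d hb hs]
      · have ht := scan3_tail_of_not_found tok (by simpa using hf)
        by_cases hc : c = ':'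
        · subst hc
          simp only [hf, Bool.false_eq_true, ite_false, ite_true, ht, unescA_nil,
            loopB_colon_false]
        · simp only [hf, Bool.false_eq_true, ite_false, hc, ht, unescA_nil,
            loopB_cons_false c rest _ _ d hb hs hc]

-- ===== VERDICT (by name: the statement is the Claim_ definition above) =====
theorem split_pairs_py_spec : Claim_equal_split_pairs_py := by
  intro body _
  unfold Spec_split_pairs_py split_pairs_py split_pairs_py_alt
  rw [main_inv body.toList [] PySem.Dict.empty wfTok_nil, scan3_nil, unescA_nil]
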